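-- pv_equiv track=rewrite | github.com/PoDuReM/Code-Theory | lib/util.py | get_cyclic_classes
-- ===== SOURCE A (Python) =====
-- def get_cyclic_classes(modulus):
--     result = [[0]]
--     unused_count = modulus - 1
--     used = {0: True}
--     for i in range(1, modulus):
--         new_class = []
--         cur = i
--         while not (cur in used or cur in new_class):
--             new_class.append(cur)
--             cur = (cur * 2) % modulus
--         if not (cur in used) and cur in new_class:
--             for it in new_class:
--                 used[it] = True
--             unused_count -= len(new_class)
--             result.append(new_class)
--     return result
-- ===== SOURCE B (Python) =====
-- def get_cyclic_classes(modulus):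
--     # Cycle-first algorithm: membership of i's orbit in an already-emitted class is
--     # decided in O(1) by jumping straight onto the orbit's cycle with one modular
--     # power (i * 2**t lands on the cycle for t = modulus.bit_length()), instead of
--     # re-walking orbits with per-step membership tests.
--     result = [[0]]
--     shift = 1 << max(modulus, 0).bit_length()
--     on_seen_cycle = {0}          # every element of every cycle discovered so far
--     for i in range(1, modulus):
--         c = i * shift % modulus  # closed-form jump onto the cycle of i's orbit
--         if c in on_seen_cycle:
--             continue             # that cycle's class was already emitted (or is {0})
--         # i is the first start reaching this cycle: record the cycle's elements
--         x = c
--         while True: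
--             on_seen_cycle.add(x)
--             x = x * 2 % modulus
--             if x == c:
--                 break
--         # emit i's class: the tail down to the cycle, then once around the cycle
--         path = []
--         x = i
--         while x not in on_seen_cycle:   # tail elements are never cycle elements
--             path.append(x)
--             x = x * 2 % modulus
--         entry = x
--         path.append(entry)
--         x = entry * 2 % modulus
--         while x != entry:
--             path.append(x)
--             x = x * 2 % modulus
--         result.append(path)
--     return result
-- ===== Notes on version B (the rewrite author's own statement) =====
-- stated objective: faster
-- what changed: B decides whether i starts a new class in O(1) by jumping directly onto the cycle of i's orbit with a single modular multiplication by 2**bit_length(modulus) and testing membership in the set of already-discovered cycle elements, then emits the class as tail-plus-one-lap-around-the-cycle; A instead re-walks the whole orbit from every start with a per-step list-membership closure test against a 'used' dict.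
import Mathlib
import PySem

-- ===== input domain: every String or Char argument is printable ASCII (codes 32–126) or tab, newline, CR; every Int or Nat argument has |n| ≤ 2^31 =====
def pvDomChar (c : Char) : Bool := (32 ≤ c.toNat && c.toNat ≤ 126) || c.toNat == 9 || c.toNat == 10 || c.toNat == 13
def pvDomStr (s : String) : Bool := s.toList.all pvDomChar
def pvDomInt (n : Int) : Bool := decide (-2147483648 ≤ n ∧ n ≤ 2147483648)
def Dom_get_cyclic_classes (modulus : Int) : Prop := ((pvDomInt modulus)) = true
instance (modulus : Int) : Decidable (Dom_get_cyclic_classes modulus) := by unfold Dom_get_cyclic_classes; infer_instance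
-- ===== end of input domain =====

-- B replaces A's per-start orbit walk with its per-step membership closure test by a
-- cycle-first algorithm: one modular multiplication by 2^bit_length(modulus) jumps
-- straight onto the cycle of i's orbit, an O(1) set test on discovered-cycle elements
-- decides acceptance, and an accepted class is emitted as tail-plus-one-lap.

-- ===== PORT A =====
-- inner `while not (cur in used or cur in new_class)` loop of A; fuel-bounded
def aLoop (modulus : Int) (used : PySem.Dict Int Bool) : Nat → List Int → Int → (List Int × Int)
  | 0, nc, cur => (nc, cur)
  | fuel+1, nc, cur =>
    if used.contains cur || nc.contains cur then (nc, cur)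
    else aLoop modulus used fuel (nc ++ [cur]) (PySem.Int.mod (cur * 2) modulus)

-- body of A's `for i in range(1, modulus)` loop; state = (result, unused_count, used)
def aStep (modulus : Int) (st : List (List Int) × Int × PySem.Dict Int Bool) (i : Int) :
    List (List Int) × Int × PySem.Dict Int Bool :=
  let r := aLoop modulus st.2.2 (modulus.toNat + 1) [] i
  if !(st.2.2.contains r.2) && r.1.contains r.2 then
    (st.1 ++ [r.1], st.2.1 - (r.1.length : Int),
     r.1.foldl (fun d it => d.insert it true) st.2.2)
  else st

def get_cyclic_classes (modulus : Int) : List (List Int) :=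
  ((PySem.List.pyRange 1 modulus 1).foldl (aStep modulus)
    ([[0]], modulus - 1, PySem.Dict.empty.insert 0 true)).1

-- ===== PORT B =====
-- Source B's `while True: add x; x = x*2%m; if x == c: break` cycle-recording loop
def bCollect (m c : Int) : Nat → PySem.Set Int → Int → PySem.Set Int
  | 0, s, _ => s
  | fuel+1, s, x =>
    let s' := PySem.Set.add s x
    let x' := PySem.Int.mod (x * 2) m
    if x' == c then s' else bCollect m c fuel s' x'

-- Source B's `while x not in on_seen_cycle: path.append(x); x = x*2%m` tail loop
def bTail (m : Int) (s : PySem.Set Int) : Nat → List Int → Int → (List Int × Int)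
  | 0, path, x => (path, x)
  | fuel+1, path, x =>
    if s.contains x then (path, x)
    else bTail m s fuel (path ++ [x]) (PySem.Int.mod (x * 2) m)

-- Source B's `while x != entry: path.append(x); x = x*2%m` lap-around-the-cycle loop
def bCycle (m entry : Int) : Nat → List Int → Int → List Int
  | 0, path, _ => path
  | fuel+1, path, x =>
    if x == entry then path
    else bCycle m entry fuel (path ++ [x]) (PySem.Int.mod (x * 2) m)

-- body of Source B's `for i in range(1, modulus)` loop; state = (result, on_seen_cycle)
def bStep (m shift : Int) (st : List (List Int) × PySem.Set Int) (i : Int) :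
    List (List Int) × PySem.Set Int :=
  let c := PySem.Int.mod (i * shift) m
  if st.2.contains c then st
  else
    let s' := bCollect m c (m.toNat + 1) st.2 c
    let t := bTail m s' (m.toNat + 1) [] i
    let path := bCycle m t.2 (m.toNat + 1) (t.1 ++ [t.2]) (PySem.Int.mod (t.2 * 2) m)
    (st.1 ++ [path], s')

def get_cyclic_classes_alt (modulus : Int) : List (List Int) :=
  ((PySem.List.pyRange 1 modulus 1).foldl
    (bStep modulus ((2:Int) ^ (PySem.Int.bitLength (max modulus 0))))
    ([[0]], PySem.Set.ofList [0])).1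

-- ===== PRECONDITION & SPEC =====
def Spec_get_cyclic_classes (modulus : Int) (out : List (List Int)) : Prop := out = get_cyclic_classes_alt modulus
instance (modulus : Int) (out : List (List Int)) : Decidable (Spec_get_cyclic_classes modulus out) := by unfold Spec_get_cyclic_classes; infer_instance

-- ===== CLAIM (what is proved, stated in full; the proofs are below) =====
def Claim_equal_get_cyclic_classes : Prop := ∀ (modulus : Int), Dom_get_cyclic_classes modulus → Spec_get_cyclic_classes modulus (get_cyclic_classes modulus)

-- ===== LEMMAS AND PROOFS =====

lemma pvBoolExt {a b : Bool} (h : a = true ↔ b = true) : a = b := by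
  cases a <;> cases b <;> simp_all

lemma pvNotTrue {b : Bool} (h : ¬ b = true) : b = false := by
  cases b
  · rfl
  · exact absurd rfl h

lemma pvContains_iff {l : List Int} {x : Int} : l.contains x = true ↔ x ∈ l := by
  simp

lemma pvSetMem {s : PySem.Set Int} {x : Int} : s.contains x = true ↔ x ∈ s := by
  simp

-- the doubling map and its orbit
def pvF (m : Int) : Int → Int := fun x => PySem.Int.mod (x * 2) m
def pvOrb (m i : Int) (k : Nat) : Int := (pvF m)^[k] i
def pvPrefix (m i : Int) (p : Nat) : List Int := (List.range p).map (pvOrb m i)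
def pvT (m : Int) : Nat := PySem.Int.bitLength (max m 0)

-- A's inner loop, abstracted over the "used" membership test
def pvGen (S : Int → Bool) (m : Int) : Nat → List Int → Int → (List Int × Int)
  | 0, path, cur => (path, cur)
  | fuel+1, path, cur =>
    if S cur || path.contains cur then (path, cur)
    else pvGen S m fuel (path ++ [cur]) (pvF m cur)

-- the loop started at i has reason to stop after q steps: S hit or orbit repeat
def pvStop (S : Int → Bool) (m i : Int) (q : Nat) : Prop :=
  S (pvOrb m i q) = true ∨ ∃ j < q, pvOrb m i q = pvOrb m i j

lemma aLoop_eq_pvGen (m : Int) (d : PySem.Dict Int Bool) :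
    ∀ (fuel : Nat) (nc : List Int) (cur : Int),
      aLoop m d fuel nc cur = pvGen (fun x => d.contains x) m fuel nc cur := by
  intro fuel
  induction fuel with
  | zero => intro nc cur; rfl
  | succ fuel ih =>
    intro nc cur
    cases hc : (d.contains cur || nc.contains cur)
    · simp only [aLoop, pvGen, hc, Bool.false_eq_true, if_false]
      exact ih _ _
    · simp only [aLoop, pvGen, hc, if_true]

lemma pvOrb_succ (m i : Int) (k : Nat) : pvOrb m i (k+1) = pvF m (pvOrb m i k) := by
  unfold pvOrb
  rw [Function.iterate_succ_apply']

lemma pvOrb_bounds (m i : Int) (hm : 0 < m) (h0 : 0 ≤ i) (h1 : i < m) :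
    ∀ k, 0 ≤ pvOrb m i k ∧ pvOrb m i k < m := by
  intro k
  induction k with
  | zero => exact ⟨h0, h1⟩
  | succ k _ =>
    rw [pvOrb_succ]
    unfold pvF
    exact ⟨PySem.Int.mod_nonneg _ hm, PySem.Int.mod_lt _ hm⟩

lemma pvOrb_add (m i : Int) (a b : Nat) : pvOrb m (pvOrb m i b) a = pvOrb m i (a + b) := by
  unfold pvOrb
  rw [Function.iterate_add_apply]

lemma pvShiftEq (m i : Int) {u v : Nat} (h : pvOrb m i u = pvOrb m i v) (k : Nat) :
    pvOrb m i (k + u) = pvOrb m i (k + v) := by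
  rw [← pvOrb_add, h, pvOrb_add]

lemma pvPrefix_nodup (S : Int → Bool) (m i : Int) (p : Nat)
    (h : ∀ q < p, ¬ pvStop S m i q) : (pvPrefix m i p).Nodup := by
  apply List.Nodup.map_on _ List.nodup_range
  intro j hj k hk he
  rw [List.mem_range] at hj hk
  rcases lt_trichotomy j k with hlt | heq | hlt
  · exact absurd (Or.inr ⟨j, hlt, he.symm⟩) (h k hk)
  · exact heq
  · exact absurd (Or.inr ⟨k, hlt, he⟩) (h j hj)

lemma pvGen_spec (S : Int → Bool) (m : Int) (hm : 0 < m) (i : Int) (h0 : 0 ≤ i) (h1 : i < m) :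
    ∀ (fuel p : Nat), m.toNat + 1 ≤ fuel + p → (∀ q < p, ¬ pvStop S m i q) →
      ∃ P, p ≤ P ∧ pvStop S m i P ∧ (∀ q < P, ¬ pvStop S m i q) ∧
        pvGen S m fuel (pvPrefix m i p) (pvOrb m i p) = (pvPrefix m i P, pvOrb m i P) := by
  intro fuel
  induction fuel with
  | zero =>
    intro p hfuel hns
    exfalso
    have hnd := pvPrefix_nodup S m i p hns
    have hsub : (pvPrefix m i p).toFinset ⊆ Finset.Ico (0:ℤ) m := by
      intro x hx
      rw [List.mem_toFinset] at hx
      simp only [pvPrefix, List.mem_map, List.mem_range] at hx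
      obtain ⟨k, _, rfl⟩ := hx
      have hb := pvOrb_bounds m i hm h0 h1 k
      rw [Finset.mem_Ico]
      exact hb
    have hcard := Finset.card_le_card hsub
    rw [List.toFinset_card_of_nodup hnd] at hcard
    have hlen : (pvPrefix m i p).length = p := by
      simp [pvPrefix]
    rw [hlen, Int.card_Ico] at hcard
    omega
  | succ fuel ih =>
    intro p hfuel hns
    by_cases hstop : pvStop S m i p
    · refine ⟨p, le_refl _, hstop, hns, ?_⟩
      have hcond : (S (pvOrb m i p) || (pvPrefix m i p).contains (pvOrb m i p)) = true := by
        rcases hstop with hS | ⟨j, hj, hje⟩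
        · rw [hS, Bool.true_or]
        · have hmem : pvOrb m i p ∈ pvPrefix m i p := by
            simp only [pvPrefix, List.mem_map, List.mem_range]
            exact ⟨j, hj, hje.symm⟩
          rw [pvContains_iff.mpr hmem, Bool.or_true]
      simp only [pvGen, hcond, if_true]
    · have hcond : (S (pvOrb m i p) || (pvPrefix m i p).contains (pvOrb m i p)) = false := by
        have hS : S (pvOrb m i p) = false := by
          apply pvNotTrue
          intro hS
          exact hstop (Or.inl hS)
        have hmem : (pvPrefix m i p).contains (pvOrb m i p) = false := by
          apply pvNotTrue
          intro hmem
          have hmem' := pvContains_iff.mp hmem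
          simp only [pvPrefix, List.mem_map, List.mem_range] at hmem'
          obtain ⟨j, hj, hje⟩ := hmem'
          exact hstop (Or.inr ⟨j, hj, hje.symm⟩)
        rw [hS, hmem]
        rfl
      obtain ⟨P, hP1, hP2, hP3, hP4⟩ := ih (p+1) (by omega) (by
        intro q hq
        rcases Nat.lt_succ_iff_lt_or_eq.mp hq with hlt | heq
        · exact hns q hlt
        · subst heq; exact hstop)
      refine ⟨P, by omega, hP2, hP3, ?_⟩
      have e1 : pvPrefix m i p ++ [pvOrb m i p] = pvPrefix m i (p+1) := by
        simp [pvPrefix, List.range_succ]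
      have e2 : pvF m (pvOrb m i p) = pvOrb m i (p+1) := by
        rw [pvOrb_succ]
      simp only [pvGen, hcond, Bool.false_eq_true, if_false]
      rw [e1, e2]
      exact hP4

lemma pvStop_unique (S : Int → Bool) (m i : Int) (P P' : Nat)
    (h1 : pvStop S m i P) (h2 : ∀ q < P, ¬ pvStop S m i q)
    (h3 : pvStop S m i P') (h4 : ∀ q < P', ¬ pvStop S m i q) : P = P' := by
  rcases lt_trichotomy P P' with h | h | h
  · exact absurd h1 (h4 P h)
  · exact h
  · exact absurd h3 (h2 P' h)

lemma pvDict_foldl_insert_contains (nc : List Int) :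
    ∀ (d : PySem.Dict Int Bool) (x : Int),
      (nc.foldl (fun d it => d.insert it true) d).contains x = (d.contains x || nc.contains x) := by
  induction nc with
  | nil => intro d x; simp
  | cons a t ih =>
    intro d x
    simp only [List.foldl_cons]
    rw [ih, PySem.Dict.contains_insert]
    apply pvBoolExt
    simp only [Bool.or_eq_true, beq_iff_eq, pvContains_iff, List.mem_cons]
    tauto

-- closure of a set under f propagates along the orbit
lemma pvChain (m : Int) (sB : PySem.Set Int)
    (h3 : ∀ x, sB.contains x = true → sB.contains (pvF m x) = true)
    (i : Int) (M : Nat) (hM : sB.contains (pvOrb m i M) = true) :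
    ∀ N, sB.contains (pvOrb m i (M + N)) = true := by
  intro N
  induction N with
  | zero => exact hM
  | succ N ih =>
    have : M + (N + 1) = (M + N) + 1 := by omega
    rw [this, pvOrb_succ]
    exact h3 _ ih

lemma pvPeriodMul (m c : Int) (p0 : Nat) (hc : pvOrb m c p0 = c) :
    ∀ (n k : Nat), pvOrb m c (n + k * p0) = pvOrb m c n := by
  intro n k
  induction k with
  | zero => simp
  | succ k ih =>
    have h1 : n + (k+1) * p0 = p0 + (n + k * p0) := by ring
    rw [h1, ← pvOrb_add, pvOrb_add, ← Nat.add_comm (n + k * p0) p0, ← pvOrb_add, hc, ih]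

lemma pvCycMem (m c : Int) (p0 : Nat) (hp0 : 0 < p0) (hc : pvOrb m c p0 = c) :
    ∀ n, ∃ j, j < p0 ∧ pvOrb m c n = pvOrb m c j := by
  intro n
  induction n using Nat.strong_induction_on with
  | _ n ih =>
    by_cases hn : n < p0
    · exact ⟨n, hn, rfl⟩
    · obtain ⟨j, hj, hje⟩ := ih (n - p0) (by omega)
      refine ⟨j, hj, ?_⟩
      have h1 : n = (n - p0) + 1 * p0 := by omega
      rw [h1, pvPeriodMul m c p0 hc, hje]

-- closed form of the orbit: k-fold doubling is multiplication by 2^k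
lemma pvOrb_pow (m : Int) (hm : 0 < m) :
    ∀ (k : Nat), 1 ≤ k → ∀ i, pvOrb m i k = PySem.Int.mod ((2:Int)^k * i) m := by
  intro k
  induction k with
  | zero => omega
  | succ k ih =>
    intro _ i
    by_cases hk : 1 ≤ k
    · rw [pvOrb_succ, ih hk]
      unfold pvF
      rw [PySem.Int.mod_eq_emod_of_pos hm, PySem.Int.mod_eq_emod_of_pos hm,
        PySem.Int.mod_eq_emod_of_pos hm]
      have h1 : ((2:Int)^k * i) % m * 2 % m = ((2:Int)^k * i * 2) % m := by
        rw [Int.mul_emod, Int.emod_emod_of_dvd _ dvd_rfl, ← Int.mul_emod]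
      rw [h1]
      congr 1
      ring
    · have hk0 : k = 0 := by omega
      subst hk0
      show pvF m i = PySem.Int.mod ((2:Int)^1 * i) m
      unfold pvF
      congr 1
      ring

lemma pvT_pos (m : Int) (hm : 0 < m) : 1 ≤ pvT m := by
  have h := PySem.Int.lt_two_pow_bitLength (max m 0)
  rw [max_eq_left hm.le] at h
  by_contra hc
  have ht : pvT m = 0 := by unfold pvT at *; rw [max_eq_left hm.le] at *; omega
  unfold pvT at ht
  rw [max_eq_left hm.le] at ht
  rw [ht, pow_zero] at h
  omega

lemma pvT_le (m : Int) (hm : 0 < m) : pvT m ≤ m.toNat := by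
  have h1 := PySem.Int.two_pow_bitLength_le m (by omega)
  have h2 : (pvT m) - 1 < 2 ^ (pvT m - 1) := Nat.lt_two_pow_self
  have h3 : pvT m = PySem.Int.bitLength m := by
    unfold pvT
    rw [max_eq_left hm.le]
  rw [← h3] at h1
  omega

-- arithmetic core: m divides 2^bitlen(m) * (2^p - 1) for p = φ(odd part of m)
lemma pvOrbit_avoid (S : Int → Bool) (m i : Int) (P j : Nat) (hj : j < P)
    (heq : pvOrb m i P = pvOrb m i j) (hav : ∀ q ≤ P, S (pvOrb m i q) = false) :
    ∀ k, S (pvOrb m i k) = false := by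
  intro k
  induction k using Nat.strong_induction_on with
  | _ k ih =>
    by_cases hk : k ≤ P
    · exact hav k hk
    · have hk' : P < k := by omega
      have he : pvOrb m i k = pvOrb m i (k - P + j) := by
        have h1 : pvOrb m (pvOrb m i P) (k - P) = pvOrb m i k := by
          rw [pvOrb_add]
          congr 1
          omega
        rw [← h1, heq, pvOrb_add]
      rw [he]
      exact ih (k - P + j) (by omega)

lemma pvKey (m : Int) (hm : 0 < m) :
    ∃ p : Nat, 1 ≤ p ∧ (m : Int) ∣ (2:Int) ^ (pvT m) * ((2:Int)^p - 1) := by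
  have hM : 0 < m.toNat := by omega
  have hMne : m.toNat ≠ 0 := by omega
  have hb2 : Nat.Coprime 2 (m.toNat / 2 ^ (m.toNat).factorization 2) :=
    Nat.coprime_ordCompl Nat.prime_two hMne
  have hbpos : 0 < m.toNat / 2 ^ (m.toNat).factorization 2 := Nat.ordCompl_pos 2 hMne
  refine ⟨(m.toNat / 2 ^ (m.toNat).factorization 2).totient, Nat.totient_pos.mpr hbpos, ?_⟩
  have h2p : (1:ℕ) ≤ 2 ^ (m.toNat / 2 ^ (m.toNat).factorization 2).totient :=
    Nat.one_le_pow _ _ (by norm_num)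
  have hbd : (m.toNat / 2 ^ (m.toNat).factorization 2) ∣
      2 ^ (m.toNat / 2 ^ (m.toNat).factorization 2).totient - 1 :=
    (Nat.modEq_iff_dvd' h2p).mp (Nat.ModEq.pow_totient hb2).symm
  have hlt : m.natAbs < 2 ^ pvT m := by
    have h := PySem.Int.lt_two_pow_bitLength m
    unfold pvT
    rwa [max_eq_left hm.le]
  have h2aM : 2 ^ (m.toNat).factorization 2 ∣ m.toNat := Nat.ordProj_dvd m.toNat 2
  have h2ale : 2 ^ (m.toNat).factorization 2 ≤ m.toNat := Nat.le_of_dvd hM h2aM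
  have hat : (m.toNat).factorization 2 < pvT m := by
    have h1 : (2:ℕ) ^ (m.toNat).factorization 2 < 2 ^ pvT m := by omega
    exact (Nat.pow_lt_pow_iff_right (by norm_num)).mp h1
  have hMd : m.toNat ∣ 2 ^ pvT m *
      (2 ^ (m.toNat / 2 ^ (m.toNat).factorization 2).totient - 1) := by
    have hcop : Nat.Coprime (2 ^ (m.toNat).factorization 2)
        (m.toNat / 2 ^ (m.toNat).factorization 2) := Nat.Coprime.pow_left _ hb2
    have hd1 : 2 ^ (m.toNat).factorization 2 ∣ 2 ^ pvT m *
        (2 ^ (m.toNat / 2 ^ (m.toNat).factorization 2).totient - 1) :=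
      dvd_mul_of_dvd_left (pow_dvd_pow 2 hat.le) _
    have hd2 : (m.toNat / 2 ^ (m.toNat).factorization 2) ∣ 2 ^ pvT m *
        (2 ^ (m.toNat / 2 ^ (m.toNat).factorization 2).totient - 1) :=
      Dvd.dvd.mul_left hbd _
    have h := Nat.Coprime.mul_dvd_of_dvd_of_dvd hcop hd1 hd2
    rwa [Nat.ordProj_mul_ordCompl_eq_self] at h
  have hmM : (m : Int) = ((m.toNat : ℕ) : Int) := by omega
  have hcast : ((2 ^ pvT m *
      (2 ^ (m.toNat / 2 ^ (m.toNat).factorization 2).totient - 1) : ℕ) : ℤ) =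
      (2:Int) ^ pvT m *
        ((2:Int) ^ (m.toNat / 2 ^ (m.toNat).factorization 2).totient - 1) := by
    rw [Nat.cast_mul, Nat.cast_pow, Nat.cast_sub h2p, Nat.cast_pow]
    norm_num
  have hdvd : ((m.toNat : ℕ) : ℤ) ∣ (2:Int) ^ pvT m *
      ((2:Int) ^ (m.toNat / 2 ^ (m.toNat).factorization 2).totient - 1) := by
    rw [← hcast]
    exact_mod_cast hMd
  rw [← hmM] at hdvd
  exact hdvd

lemma pvPeriodIter (m : Int) (p : Nat)
    (hper : ∀ x : Int, pvOrb m x (pvT m + p) = pvOrb m x (pvT m)) :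
    ∀ (x : Int) (j : Nat), pvOrb m x (pvT m + j * p) = pvOrb m x (pvT m) := by
  intro x j
  induction j with
  | zero => simp
  | succ j ih =>
    have h1 : pvT m + (j+1) * p = p + (pvT m + j * p) := by ring
    rw [h1, ← pvOrb_add, ih, pvOrb_add, show p + pvT m = pvT m + p from by ring]
    exact hper x

lemma pvPeriodT (m : Int) (hm : 0 < m) (p : Nat) (hp : 1 ≤ p)
    (hdvd : (m : Int) ∣ (2:Int) ^ (pvT m) * ((2:Int)^p - 1)) :
    ∀ x, pvOrb m x (pvT m + p) = pvOrb m x (pvT m) := by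
  intro x
  have ht := pvT_pos m hm
  rw [pvOrb_pow m hm _ (by omega) x, pvOrb_pow m hm _ (by omega) x,
    PySem.Int.mod_eq_emod_of_pos hm, PySem.Int.mod_eq_emod_of_pos hm]
  rw [Int.emod_eq_emod_iff_emod_sub_eq_zero]
  apply Int.emod_eq_zero_of_dvd
  have h1 : (2:Int) ^ (pvT m + p) * x - (2:Int) ^ (pvT m) * x =
      ((2:Int) ^ (pvT m) * ((2:Int)^p - 1)) * x := by
    rw [pow_add]
    ring
  rw [h1]
  exact hdvd.mul_right x

-- characterization of Source B's cycle-recording loop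
lemma bCollect_spec (m c : Int) (p0 : Nat) (h1 : pvOrb m c p0 = c)
    (hmin : ∀ q, 0 < q → q < p0 → pvOrb m c q ≠ c) :
    ∀ (fuel k : Nat), k < p0 → p0 - k ≤ fuel → ∀ s,
      bCollect m c fuel s (pvOrb m c k) =
        PySem.Set.update s ((List.range (p0 - k)).map (fun j => pvOrb m c (k + j))) := by
  intro fuel
  induction fuel with
  | zero =>
    intro k hk hf s
    exfalso
    omega
  | succ fuel ih =>
    intro k hk hf s
    have hx' : PySem.Int.mod (pvOrb m c k * 2) m = pvOrb m c (k+1) := by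
      rw [pvOrb_succ]
      rfl
    by_cases hkk : k + 1 = p0
    · have hbeq : (PySem.Int.mod (pvOrb m c k * 2) m == c) = true := by
        rw [hx', hkk, h1]
        simp
      simp only [bCollect, hbeq, if_true]
      rw [show p0 - k = 1 from by omega]
      simp [PySem.Set.update]
    · have hne : pvOrb m c (k+1) ≠ c := hmin (k+1) (by omega) (by omega)
      have hbeq : (PySem.Int.mod (pvOrb m c k * 2) m == c) = false := by
        rw [hx']
        simpa using hne
      simp only [bCollect, hbeq, Bool.false_eq_true, if_false]
      rw [hx', ih (k+1) (by omega) (by omega)]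
      have hsplit : (List.range (p0 - k)).map (fun j => pvOrb m c (k + j)) =
          pvOrb m c k :: (List.range (p0 - (k+1))).map (fun j => pvOrb m c ((k+1) + j)) := by
        rw [show p0 - k = (p0 - (k+1)) + 1 from by omega, List.range_succ_eq_map,
          List.map_cons, List.map_map]
        refine congrArg₂ List.cons (by simp) ?_
        apply List.map_congr_left
        intro j hj
        simp only [Function.comp_apply]
        congr 1
        omega
      rw [hsplit]
      simp [PySem.Set.update]

-- characterization of Source B's tail loop
lemma bTail_spec (m i : Int) (s : PySem.Set Int) (e : Nat)
    (hsE : s.contains (pvOrb m i e) = true)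
    (hlt : ∀ q < e, s.contains (pvOrb m i q) = false) :
    ∀ (fuel p : Nat), p ≤ e → e - p ≤ fuel →
      bTail m s fuel ((List.range p).map (pvOrb m i)) (pvOrb m i p) =
        ((List.range e).map (pvOrb m i), pvOrb m i e) := by
  intro fuel
  induction fuel with
  | zero =>
    intro p hp hf
    have hpe : p = e := by omega
    subst hpe
    rfl
  | succ fuel ih =>
    intro p hp hf
    by_cases hpe : p = e
    · subst hpe
      simp only [bTail, hsE, if_true]
    · have hlt' : s.contains (pvOrb m i p) = false := hlt p (by omega)
      simp only [bTail, hlt', Bool.false_eq_true, if_false]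
      have e1 : (List.range p).map (pvOrb m i) ++ [pvOrb m i p] =
          (List.range (p+1)).map (pvOrb m i) := by
        rw [List.range_succ]
        simp
      have e2 : PySem.Int.mod (pvOrb m i p * 2) m = pvOrb m i (p+1) := by
        rw [pvOrb_succ]
        rfl
      rw [e1, e2]
      exact ih (p+1) (by omega) (by omega)

-- characterization of Source B's lap-around-the-cycle loop
lemma bCycle_spec (m entry : Int) (p0 : Nat) (h1 : pvOrb m entry p0 = entry)
    (hmin : ∀ q, 0 < q → q < p0 → pvOrb m entry q ≠ entry) :
    ∀ (fuel k : Nat), 1 ≤ k → k ≤ p0 → p0 - k ≤ fuel → ∀ path,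
      bCycle m entry fuel path (pvOrb m entry k) =
        path ++ (List.range (p0 - k)).map (fun j => pvOrb m entry (k + j)) := by
  intro fuel
  induction fuel with
  | zero =>
    intro k hk1 hk2 hf path
    have hkp : k = p0 := by omega
    simp only [bCycle]
    rw [hkp, Nat.sub_self]
    simp
  | succ fuel ih =>
    intro k hk1 hk2 hf path
    by_cases hkp : k = p0
    · have hbeq : (pvOrb m entry k == entry) = true := by
        rw [hkp, h1]
        simp
      simp only [bCycle, hbeq, if_true]
      rw [hkp, Nat.sub_self]
      simp
    · have hne : pvOrb m entry k ≠ entry := hmin k (by omega) (by omega)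
      have hbeq : (pvOrb m entry k == entry) = false := by
        simpa using hne
      simp only [bCycle, hbeq, Bool.false_eq_true, if_false]
      have e2 : PySem.Int.mod (pvOrb m entry k * 2) m = pvOrb m entry (k+1) := by
        rw [pvOrb_succ]
        rfl
      rw [e2, ih (k+1) (by omega) (by omega) (by omega) (path ++ [pvOrb m entry k]),
        List.append_assoc]
      congr 1
      rw [show p0 - k = (p0 - (k+1)) + 1 from by omega, List.range_succ_eq_map,
        List.map_cons, List.map_map]
      simp only [List.singleton_append]
      refine congrArg₂ List.cons (by simp) ?_
      apply List.map_congr_left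
      intro j hj
      simp only [Function.comp_apply]
      congr 1
      omega

-- the outer-loop simulation
lemma pvFold (m : Int) (hm : 0 < m) (p : Nat) (hp : 1 ≤ p)
    (hper : ∀ x : Int, pvOrb m x (pvT m + p) = pvOrb m x (pvT m))
    (L : List Int) (hL : ∀ x ∈ L, 0 ≤ x ∧ x < m) :
    ∀ (resA : List (List Int)) (uc : Int) (dA : PySem.Dict Int Bool)
      (resB : List (List Int)) (sB : PySem.Set Int),
      resA = resB →
      (∀ x, sB.contains x = true → dA.contains x = true) →
      (∀ x, dA.contains x = true → ∃ k, sB.contains (pvOrb m x k) = true) →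
      (∀ x, sB.contains x = true → sB.contains (pvF m x) = true) →
      (L.foldl (aStep m) (resA, uc, dA)).1 =
      (L.foldl (bStep m ((2:Int) ^ (pvT m))) (resB, sB)).1 := by
  classical
  induction L with
  | nil =>
    intro resA uc dA resB sB hres _ _ _
    simpa using hres
  | cons i L ihL =>
    intro resA uc dA resB sB hres hsub hreach hclosed
    have hi : 0 ≤ i ∧ i < m := hL i (by simp)
    have hL' : ∀ x ∈ L, 0 ≤ x ∧ x < m := fun x hx => hL x (by simp [hx])
    simp only [List.foldl_cons]
    have ht1 := pvT_pos m hm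
    have hc : PySem.Int.mod (i * (2:Int) ^ (pvT m)) m = pvOrb m i (pvT m) := by
      rw [pvOrb_pow m hm _ (by omega) i]
      congr 1
      ring
    obtain ⟨PA, _, hstopA, hminA, hevalA⟩ :=
      pvGen_spec (fun x => dA.contains x) m hm i hi.1 hi.2 (m.toNat + 1) 0 (by omega)
        (by intro q hq; exact absurd hq (Nat.not_lt_zero q))
    have hALoop : aLoop m dA (m.toNat + 1) [] i = (pvPrefix m i PA, pvOrb m i PA) := by
      rw [aLoop_eq_pvGen]
      exact hevalA
    by_cases hB : sB.contains (pvOrb m i (pvT m)) = true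
    · -- B skips this start; A's walk must reject too
      have hBstep : bStep m ((2:Int) ^ (pvT m)) (resB, sB) i = (resB, sB) := by
        simp only [bStep, hc]
        rw [hB]
        rfl
      have hcondA : (!(dA.contains (pvOrb m i PA)) && (pvPrefix m i PA).contains (pvOrb m i PA)) = false := by
        by_cases hdA : dA.contains (pvOrb m i PA) = true
        · rw [hdA]
          rfl
        · apply pvNotTrue
          intro hacc
          rw [Bool.and_eq_true] at hacc
          have hmem := pvContains_iff.mp hacc.2
          simp only [pvPrefix, List.mem_map, List.mem_range] at hmem
          obtain ⟨j, hj, hje⟩ := hmem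
          have hav : ∀ q ≤ PA, dA.contains (pvOrb m i q) = false := by
            intro q hq
            rcases Nat.lt_or_ge q PA with hlt | hge
            · exact pvNotTrue (fun hS => hminA q hlt (Or.inl hS))
            · have hqe : q = PA := by omega
              subst hqe
              exact pvNotTrue hdA
          have hall := pvOrbit_avoid (fun x => dA.contains x) m i PA j hj hje.symm hav
          have hdc := hsub _ hB
          have hfalse : dA.contains (pvOrb m i (pvT m)) = false := hall (pvT m)
          rw [hfalse] at hdc
          exact Bool.false_ne_true hdc
      have hAstep : aStep m (resA, uc, dA) i = (resA, uc, dA) := by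
        simp only [aStep, hALoop]
        rw [hcondA]
        rfl
      rw [hAstep, hBstep]
      exact ihL hL' resA uc dA resB sB hres hsub hreach hclosed
    · -- fresh cycle: both sides accept the same class
      have hBf : sB.contains (pvOrb m i (pvT m)) = false := pvNotTrue hB
      -- orbit of i avoids A's used set entirely
      have havoid : ∀ q, dA.contains (pvOrb m i q) = false := by
        intro q
        apply pvNotTrue
        intro hq
        obtain ⟨k, hk⟩ := hreach _ hq
        rw [pvOrb_add] at hk
        have hchain := pvChain m sB hclosed i (k + q) hk
        have hge : k + q ≤ pvT m + (k + q) * p := by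
          have h := Nat.le_mul_of_pos_right (k + q) (show 0 < p by omega)
          omega
        have hcontra := hchain (pvT m + (k + q) * p - (k + q))
        rw [show (k + q) + (pvT m + (k + q) * p - (k + q)) = pvT m + (k + q) * p from by omega,
          pvPeriodIter m p hper i (k + q)] at hcontra
        rw [hBf] at hcontra
        exact Bool.false_ne_true hcontra
      have hcp : pvOrb m (pvOrb m i (pvT m)) p = pvOrb m i (pvT m) := by
        rw [pvOrb_add, show p + pvT m = pvT m + p from by ring]
        exact hper i
      have hP0ex : ∃ k, 0 < k ∧ pvOrb m (pvOrb m i (pvT m)) k = pvOrb m i (pvT m) :=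
        ⟨p, by omega, hcp⟩
      set p0 := Nat.find hP0ex with hp0def
      obtain ⟨hp0pos, hp0eq⟩ := Nat.find_spec hP0ex
      have hp0min : ∀ q, 0 < q → q < p0 → pvOrb m (pvOrb m i (pvT m)) q ≠ pvOrb m i (pvT m) := by
        intro q hq1 hq2 hq3
        exact Nat.find_min hP0ex hq2 ⟨hq1, hq3⟩
      have hccb := pvOrb_bounds m i hm hi.1 hi.2 (pvT m)
      have hCycNodup : ((List.range p0).map (fun j => pvOrb m (pvOrb m i (pvT m)) j)).Nodup := by
        apply List.Nodup.map_on _ List.nodup_range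
        intro u hu v hv he
        rw [List.mem_range] at hu hv
        by_contra hne
        rcases lt_trichotomy u v with hlt | heqv | hlt
        · have h2 := pvShiftEq m (pvOrb m i (pvT m)) he (p0 - v)
          rw [show p0 - v + v = p0 from by omega, hp0eq] at h2
          exact hp0min (p0 - v + u) (by omega) (by omega) h2
        · exact hne heqv
        · have h2 := pvShiftEq m (pvOrb m i (pvT m)) he.symm (p0 - u)
          rw [show p0 - u + u = p0 from by omega, hp0eq] at h2
          exact hp0min (p0 - u + v) (by omega) (by omega) h2
      have hp0le : p0 ≤ m.toNat := by
        have hsubF : ((List.range p0).map (fun j => pvOrb m (pvOrb m i (pvT m)) j)).toFinset ⊆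
            Finset.Ico (0:ℤ) m := by
          intro x hx
          rw [List.mem_toFinset] at hx
          simp only [List.mem_map, List.mem_range] at hx
          obtain ⟨k, _, rfl⟩ := hx
          have hb := pvOrb_bounds m _ hm hccb.1 hccb.2 k
          rw [Finset.mem_Ico]
          exact hb
        have hcard := Finset.card_le_card hsubF
        rw [List.toFinset_card_of_nodup hCycNodup] at hcard
        rw [List.length_map, List.length_range, Int.card_Ico] at hcard
        omega
      set s' := PySem.Set.update sB ((List.range p0).map (fun j => pvOrb m (pvOrb m i (pvT m)) j))
        with hs'def
      have hcol : bCollect m (pvOrb m i (pvT m)) (m.toNat + 1) sB (pvOrb m i (pvT m)) = s' := by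
        rw [hs'def]
        have h := bCollect_spec m (pvOrb m i (pvT m)) p0 hp0eq hp0min (m.toNat + 1) 0
          (by omega) (by omega) sB
        simpa using h
      have hs'mem : ∀ x, s'.contains x = true ↔
          sB.contains x = true ∨ ∃ j, j < p0 ∧ x = pvOrb m (pvOrb m i (pvT m)) j := by
        intro x
        rw [hs'def, pvSetMem, PySem.Set.mem_update]
        constructor
        · rintro (hx | hx)
          · exact Or.inl (pvSetMem.mpr hx)
          · simp only [List.mem_map, List.mem_range] at hx
            obtain ⟨j, hj, hje⟩ := hx
            exact Or.inr ⟨j, hj, hje.symm⟩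
        · rintro (hx | ⟨j, hj, hje⟩)
          · exact Or.inl (pvSetMem.mp hx)
          · right
            simp only [List.mem_map, List.mem_range]
            exact ⟨j, hj, hje.symm⟩
      have hEex : ∃ q, ∃ j, j < p0 ∧ pvOrb m i q = pvOrb m (pvOrb m i (pvT m)) j :=
        ⟨pvT m, 0, hp0pos, rfl⟩
      set e := Nat.find hEex with hedef
      obtain ⟨j0, hj0, hentry⟩ := Nat.find_spec hEex
      have hemin : ∀ q < e, ¬ ∃ j, j < p0 ∧ pvOrb m i q = pvOrb m (pvOrb m i (pvT m)) j :=
        fun q hq => Nat.find_min hEex hq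
      have heT : e ≤ pvT m := Nat.find_le ⟨0, hp0pos, rfl⟩
      have hep : pvOrb m (pvOrb m i e) p0 = pvOrb m i e := by
        rw [hentry, pvOrb_add, show p0 + j0 = j0 + 1 * p0 from by ring,
          pvPeriodMul m _ p0 hp0eq]
      have hepmin : ∀ q, 0 < q → q < p0 → pvOrb m (pvOrb m i e) q ≠ pvOrb m i e := by
        intro q hq1 hq2 hqe
        rw [hentry, pvOrb_add] at hqe
        have h2 := pvShiftEq m (pvOrb m i (pvT m)) hqe (p0 - j0)
        rw [show p0 - j0 + (q + j0) = q + 1 * p0 from by omega,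
          show p0 - j0 + j0 = p0 from by omega,
          pvPeriodMul m _ p0 hp0eq, hp0eq] at h2
        exact hp0min q hq1 hq2 h2
      have hsE : s'.contains (pvOrb m i e) = true := (hs'mem _).mpr (Or.inr ⟨j0, hj0, hentry⟩)
      have hsLt : ∀ q < e, s'.contains (pvOrb m i q) = false := by
        intro q hq
        apply pvNotTrue
        intro hcq
        rcases (hs'mem _).mp hcq with hx | ⟨j, hj, hje⟩
        · have hdc := hsub _ hx
          rw [havoid q] at hdc
          exact Bool.false_ne_true hdc
        · exact hemin q hq ⟨j, hj, hje⟩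
      have htail : bTail m s' (m.toNat + 1) [] i =
          ((List.range e).map (pvOrb m i), pvOrb m i e) := by
        have h := bTail_spec m i s' e hsE hsLt (m.toNat + 1) 0 (by omega)
          (by have := pvT_le m hm; omega)
        simpa using h
      have htail1 : (bTail m s' (m.toNat + 1) [] i).1 = (List.range e).map (pvOrb m i) := by
        rw [htail]
      have htail2 : (bTail m s' (m.toNat + 1) [] i).2 = pvOrb m i e := by
        rw [htail]
      have hcyc : bCycle m (pvOrb m i e) (m.toNat + 1)
            ((List.range e).map (pvOrb m i) ++ [pvOrb m i e])
            (PySem.Int.mod (pvOrb m i e * 2) m) =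
          pvPrefix m i (e + p0) := by
        have e2 : PySem.Int.mod (pvOrb m i e * 2) m = pvOrb m (pvOrb m i e) 1 := by
          rfl
        rw [e2, bCycle_spec m (pvOrb m i e) p0 hep hepmin (m.toNat + 1) 1 (le_refl 1)
          (by omega) (by omega), List.append_assoc]
        unfold pvPrefix
        rw [List.range_add, List.map_append, List.map_map]
        congr 1
        conv_rhs => rw [show p0 = (p0 - 1) + 1 from by omega, List.range_succ_eq_map]
        rw [List.map_cons, List.map_map]
        simp only [List.singleton_append]
        refine congrArg₂ List.cons ?_ ?_
        · simp [Function.comp]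
        · apply List.map_congr_left
          intro j hj
          simp only [Function.comp_apply]
          rw [pvOrb_add]
          congr 1
          omega
      have hBstep : bStep m ((2:Int) ^ (pvT m)) (resB, sB) i =
          (resB ++ [pvPrefix m i (e + p0)], s') := by
        simp only [bStep, hc]
        rw [hBf]
        simp only [Bool.false_eq_true, if_false]
        rw [hcol, htail1, htail2, hcyc]
      have hstopE : pvStop (fun x => dA.contains x) m i (e + p0) := by
        right
        refine ⟨e, by omega, ?_⟩
        rw [show e + p0 = p0 + e from by ring, ← pvOrb_add]
        exact hep
      have hminE : ∀ q < e + p0, ¬ pvStop (fun x => dA.contains x) m i q := by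
        intro q hq hst
        rcases hst with hS | ⟨u, hu, hequ⟩
        · have hS' : dA.contains (pvOrb m i q) = true := hS
          rw [havoid q] at hS'
          exact Bool.false_ne_true hS'
        · by_cases hue : e ≤ u
          · have h1 : pvOrb m (pvOrb m i e) (q - e) = pvOrb m (pvOrb m i e) (u - e) := by
              rw [pvOrb_add, pvOrb_add, show q - e + e = q from by omega,
                show u - e + e = u from by omega]
              exact hequ
            have h2 := pvShiftEq m (pvOrb m i e) h1 (p0 - (q - e))
            rw [show p0 - (q - e) + (q - e) = p0 from by omega, hep] at h2
            exact hepmin (p0 - (q - e) + (u - e)) (by omega) (by omega) h2.symm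
          · by_cases hqe2 : e ≤ q
            · obtain ⟨j, hj, hje⟩ := pvCycMem m (pvOrb m i (pvT m)) p0 hp0pos hp0eq ((q - e) + j0)
              apply hemin u (by omega)
              refine ⟨j, hj, ?_⟩
              rw [← hequ]
              calc pvOrb m i q = pvOrb m (pvOrb m i e) (q - e) := by
                    rw [pvOrb_add, show q - e + e = q from by omega]
                _ = pvOrb m (pvOrb m (pvOrb m i (pvT m)) j0) (q - e) := by rw [hentry]
                _ = pvOrb m (pvOrb m i (pvT m)) ((q - e) + j0) := by rw [pvOrb_add]
                _ = pvOrb m (pvOrb m i (pvT m)) j := hje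
            · have h2 := pvShiftEq m i hequ (e - q)
              rw [show e - q + q = e from by omega] at h2
              apply hemin (e - q + u) (by omega)
              exact ⟨j0, hj0, by rw [← h2]; exact hentry⟩
      have hPA : PA = e + p0 :=
        pvStop_unique (fun x => dA.contains x) m i PA (e + p0) hstopA hminA hstopE hminE
      rw [hPA] at hALoop
      have hcondA : (!(dA.contains (pvOrb m i (e + p0))) &&
          (pvPrefix m i (e + p0)).contains (pvOrb m i (e + p0))) = true := by
        rw [havoid]
        simp only [Bool.not_false, Bool.true_and]
        apply pvContains_iff.mpr
        simp only [pvPrefix, List.mem_map, List.mem_range]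
        refine ⟨e, by omega, ?_⟩
        rw [show e + p0 = p0 + e from by ring, ← pvOrb_add]
        exact hep.symm
      have hAstep : aStep m (resA, uc, dA) i =
          (resA ++ [pvPrefix m i (e + p0)], uc - ((pvPrefix m i (e + p0)).length : Int),
           (pvPrefix m i (e + p0)).foldl (fun d it => d.insert it true) dA) := by
        simp only [aStep, hALoop]
        rw [hcondA]
        rfl
      rw [hAstep, hBstep]
      refine ihL hL' _ _ _ _ _ (by rw [hres]) ?_ ?_ ?_
      · -- I1': everything B marked is marked by A
        intro x hx
        rcases (hs'mem x).mp hx with hxB | ⟨j, hj, hje⟩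
        · rw [pvDict_foldl_insert_contains, hsub x hxB, Bool.true_or]
        · rw [pvDict_foldl_insert_contains]
          have hd0 : pvOrb m (pvOrb m i e) (j + (p0 - j0)) = x := by
            rw [hentry, pvOrb_add, show j + (p0 - j0) + j0 = j + 1 * p0 from by omega,
              pvPeriodMul m _ p0 hp0eq]
            exact hje.symm
          obtain ⟨d, hd, hde⟩ := pvCycMem m (pvOrb m i e) p0 hp0pos hep (j + (p0 - j0))
          have hmem : x ∈ pvPrefix m i (e + p0) := by
            simp only [pvPrefix, List.mem_map, List.mem_range]
            refine ⟨e + d, by omega, ?_⟩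
            rw [show e + d = d + e from by ring, ← pvOrb_add, ← hde, hd0]
          rw [pvContains_iff.mpr hmem, Bool.or_true]
      · -- I2': everything A marked leads into B's cycle set
        intro x hx
        rw [pvDict_foldl_insert_contains, Bool.or_eq_true] at hx
        rcases hx with hx | hx
        · obtain ⟨k, hk⟩ := hreach x hx
          exact ⟨k, (hs'mem _).mpr (Or.inl hk)⟩
        · have hx' := pvContains_iff.mp hx
          simp only [pvPrefix, List.mem_map, List.mem_range] at hx'
          obtain ⟨q, hq, rfl⟩ := hx'
          refine ⟨(e + p0) - q, ?_⟩
          apply (hs'mem _).mpr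
          right
          refine ⟨j0, hj0, ?_⟩
          rw [pvOrb_add, show (e + p0) - q + q = e + p0 from by omega,
            show e + p0 = p0 + e from by ring, ← pvOrb_add, hep]
          exact hentry
      · -- I3': B's marked set stays closed under doubling
        intro x hx
        rcases (hs'mem x).mp hx with hxB | ⟨j, hj, hje⟩
        · exact (hs'mem _).mpr (Or.inl (hclosed x hxB))
        · apply (hs'mem _).mpr
          right
          obtain ⟨d, hd, hde⟩ := pvCycMem m (pvOrb m i (pvT m)) p0 hp0pos hp0eq (j + 1)
          exact ⟨d, hd, by rw [hje, ← pvOrb_succ, hde]⟩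

-- ===== VERDICT (by name: the statement is the Claim_ definition above) =====
theorem get_cyclic_classes_spec : Claim_equal_get_cyclic_classes := by
  intro m _
  unfold Spec_get_cyclic_classes get_cyclic_classes get_cyclic_classes_alt
  by_cases hm : 0 < m
  · obtain ⟨p, hp, hdvd⟩ := pvKey m hm
    have hper := pvPeriodT m hm p hp hdvd
    have halt : (2:Int) ^ (PySem.Int.bitLength (max m 0)) = (2:Int) ^ (pvT m) := rfl
    rw [halt]
    refine pvFold m hm p hp hper _ ?_ _ _ _ _ _ rfl ?_ ?_ ?_
    · intro x hx
      rw [PySem.List.mem_pyRange_one] at hx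
      omega
    · intro x hx
      rw [pvSetMem, PySem.Set.mem_ofList, List.mem_singleton] at hx
      subst hx
      rw [PySem.Dict.contains_insert]
      simp
    · intro x hx
      rw [PySem.Dict.contains_insert] at hx
      rw [Bool.or_eq_true] at hx
      rcases hx with hx | hx
      · have hx0 : x = 0 := by simpa using hx
        subst hx0
        refine ⟨0, ?_⟩
        rw [pvSetMem, PySem.Set.mem_ofList]
        simp [pvOrb]
      · rw [PySem.Dict.contains_empty] at hx
        exact absurd hx Bool.false_ne_true
    · intro x hx
      rw [pvSetMem, PySem.Set.mem_ofList, List.mem_singleton] at hx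
      subst hx
      rw [pvSetMem, PySem.Set.mem_ofList]
      have : pvF m 0 = 0 := by
        unfold pvF
        rw [PySem.Int.mod_eq_emod_of_pos hm]
        simp
      rw [this]
      simp
  · have hnil : PySem.List.pyRange 1 m 1 = [] := PySem.List.pyRange_one_eq_nil (by omega)
    rw [hnil]
    rfl
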